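-- pv_equiv track=rewrite | github.com/rohitpmore/meetcode | problems/heap/longest_happy_string.py | validate_happy_string
-- ===== SOURCE A (Python) =====
-- def validate_happy_string(result: str, a: int, b: int, c: int) -> bool:
--     """Validates that a string is a valid happy string."""
--     if not result:
--         return True
--     # Check no "aaa", "bbb", "ccc"
--     if "aaa" in result or "bbb" in result or "ccc" in result:
--         return False
--     # Check character counts don't exceed limits
--     if result.count('a') > a or result.count('b') > b or result.count('c') > c:
--         return False
--     # Check only valid characters
--     if not all(ch in 'abc' for ch in result):
--         return False
--     return True
-- ===== SOURCE B (Python) =====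
-- def validate_happy_string(result: str, a: int, b: int, c: int) -> bool:
--     """Single pass: run-length tracking + per-character counters."""
--     na = nb = nc = 0
--     prev = None
--     run = 0
--     for ch in result:
--         if ch == 'a':
--             na += 1
--         elif ch == 'b':
--             nb += 1
--         elif ch == 'c':
--             nc += 1
--         else:
--             return False
--         if ch == prev:
--             run += 1
--             if run == 3:
--                 return False
--         else:
--             prev = ch
--             run = 1
--     return na <= a and nb <= b and nc <= c
-- ===== Notes on version B (the rewrite author's own statement) =====
-- stated objective: simpler
-- what changed: A makes four separate scans (three substring searches, three full count() scans, and a validity scan); B is a single left-to-right pass maintaining a run-length counter and three character counters, with an early exit on an invalid character or a run of three.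
-- intended difference: On the empty string with a negative limit (a<0, b<0 or c<0) A returns True via its early empty-string exit, while B returns False because the count 0 already exceeds the negative limit, which is the consistent reading of the count constraint A itself applies to non-empty strings. — e.g. on validate_happy_string("", -1, 0, 0): A returns true, B returns false
import Mathlib
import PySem

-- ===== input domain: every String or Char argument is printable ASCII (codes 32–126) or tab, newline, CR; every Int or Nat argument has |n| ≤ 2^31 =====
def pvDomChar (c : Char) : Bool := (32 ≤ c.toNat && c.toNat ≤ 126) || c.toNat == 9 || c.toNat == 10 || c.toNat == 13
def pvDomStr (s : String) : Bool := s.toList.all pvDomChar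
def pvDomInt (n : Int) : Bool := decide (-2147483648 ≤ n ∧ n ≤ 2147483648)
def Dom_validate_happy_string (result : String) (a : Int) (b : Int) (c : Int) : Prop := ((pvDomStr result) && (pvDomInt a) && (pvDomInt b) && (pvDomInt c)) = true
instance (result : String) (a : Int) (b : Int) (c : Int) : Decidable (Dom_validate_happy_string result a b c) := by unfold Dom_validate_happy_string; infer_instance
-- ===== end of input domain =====

-- B replaces A's seven scans (three substring searches, three counts, one validity scan)
-- by one left-to-right pass with a run-length counter and three character counters.

-- ===== PORT A =====
def validate_happy_string (result : String) (a : Int) (b : Int) (c : Int) : Bool :=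
  if result = "" then true
  else if PySem.Str.isIn "aaa" result || PySem.Str.isIn "bbb" result || PySem.Str.isIn "ccc" result then false
  else if (PySem.Str.count result "a" : Int) > a || (PySem.Str.count result "b" : Int) > b
          || (PySem.Str.count result "c" : Int) > c then false
  else if !(result.toList.all fun ch => PySem.Chars.isIn [ch] "abc".toList) then false
  else true

-- ===== PORT B =====
-- the for-loop of Source B: state = (na, nb, nc, prev, run)
def vhsLoop (l : List Char) (na nb nc : Int) (prev : Option Char) (run : Nat)
    (a b c : Int) : Bool :=
  match l with
  | [] => decide (na ≤ a) && decide (nb ≤ b) && decide (nc ≤ c)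
  | ch :: rest =>
    match (if ch = 'a' then some (na + 1, nb, nc)
           else if ch = 'b' then some (na, nb + 1, nc)
           else if ch = 'c' then some (na, nb, nc + 1)
           else none) with
    | none => false
    | some (na', nb', nc') =>
      if some ch = prev then
        if run + 1 = 3 then false
        else vhsLoop rest na' nb' nc' prev (run + 1) a b c
      else vhsLoop rest na' nb' nc' (some ch) 1 a b c

def validate_happy_string_alt (result : String) (a : Int) (b : Int) (c : Int) : Bool :=
  vhsLoop result.toList 0 0 0 none 0 a b c

-- ===== PRECONDITION & SPEC =====
-- On the empty string with a negative limit A returns True via its early empty-string exit,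
-- while B returns False because the count 0 already exceeds the negative limit, the consistent
-- reading of the count constraint A itself applies to non-empty strings.
def D_validate_happy_string (result : String) (a : Int) (b : Int) (c : Int) : Prop :=
  result = "" ∧ (a < 0 ∨ b < 0 ∨ c < 0)
instance (result : String) (a : Int) (b : Int) (c : Int) : Decidable (D_validate_happy_string result a b c) := by
  unfold D_validate_happy_string; infer_instance

def Spec_validate_happy_string (result : String) (a : Int) (b : Int) (c : Int) (out : Bool) : Prop :=
  ¬ D_validate_happy_string result a b c → out = validate_happy_string_alt result a b c
instance (result : String) (a : Int) (b : Int) (c : Int) (out : Bool) : Decidable (Spec_validate_happy_string result a b c out) := by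
  unfold Spec_validate_happy_string; infer_instance

def pvDiffWitness_validate_happy_string : String × Int × Int × Int := ("", -1, 0, 0)
def pvDiffWitnessOut_validate_happy_string : Bool × Bool := (true, false)

-- ===== CLAIM (what is proved, stated in full; the proofs are below) =====
def Claim_unchanged_validate_happy_string : Prop := ∀ (result : String) (a : Int) (b : Int) (c : Int), Dom_validate_happy_string result a b c → Spec_validate_happy_string result a b c (validate_happy_string result a b c)
def Claim_changed_validate_happy_string : Prop := Dom_validate_happy_string (pvDiffWitness_validate_happy_string.1) (pvDiffWitness_validate_happy_string.2.1) (pvDiffWitness_validate_happy_string.2.2.1) (pvDiffWitness_validate_happy_string.2.2.2) ∧ D_validate_happy_string (pvDiffWitness_validate_happy_string.1) (pvDiffWitness_validate_happy_string.2.1) (pvDiffWitness_validate_happy_string.2.2.1) (pvDiffWitness_validate_happy_string.2.2.2) ∧ validate_happy_string (pvDiffWitness_validate_happy_string.1) (pvDiffWitness_validate_happy_string.2.1) (pvDiffWitness_validate_happy_string.2.2.1) (pvDiffWitness_validate_happy_string.2.2.2) = pvDiffWitnessOut_validate_happy_string.1 ∧ validate_happy_string_alt (pvDiffWitness_validate_happy_string.1)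 (pvDiffWitness_validate_happy_string.2.1) (pvDiffWitness_validate_happy_string.2.2.1) (pvDiffWitness_validate_happy_string.2.2.2) = pvDiffWitnessOut_validate_happy_string.2 ∧ pvDiffWitnessOut_validate_happy_string.1 ≠ pvDiffWitnessOut_validate_happy_string.2
def Claim_exact_validate_happy_string : Prop := ∀ (result : String) (a : Int) (b : Int) (c : Int), Dom_validate_happy_string result a b c → D_validate_happy_string result a b c → validate_happy_string result a b c ≠ validate_happy_string_alt result a b c

-- ===== LEMMAS AND PROOFS =====

def okChar (ch : Char) : Bool := ch == 'a' || ch == 'b' || ch == 'c'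

-- the run/triple automaton of B's loop, counts stripped
def noTripO (prev : Option Char) (run : Nat) : List Char → Bool
  | [] => true
  | ch :: rest =>
    if some ch = prev then
      if run + 1 = 3 then false else noTripO prev (run + 1) rest
    else noTripO (some ch) 1 rest

lemma vhsLoop_eq (l : List Char) : ∀ (na nb nc : Int) (prev : Option Char) (run : Nat) (a b c : Int),
    vhsLoop l na nb nc prev run a b c =
      (l.all okChar && noTripO prev run l &&
        decide (na + (l.count 'a' : Int) ≤ a ∧ nb + (l.count 'b' : Int) ≤ b
          ∧ nc + (l.count 'c' : Int) ≤ c)) := by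
  induction l with
  | nil =>
    intro na nb nc prev run a b c
    simp [vhsLoop, noTripO, Bool.and_assoc]
  | cons ch rest ih =>
    intro na nb nc prev run a b c
    have hcA : ∀ v : Char, ((ch :: rest).count v : Int) = (rest.count v : Int)
        + (if ch = v then 1 else 0) := by
      intro v
      by_cases hv : ch = v
      · subst hv
        simp
      · simp [fun h => hv (by simpa [eq_comm] using h)]
    have hall2 : (ch :: rest).all okChar = (okChar ch && rest.all okChar) := by
      simp
    by_cases hpa : ch = 'a'
    · subst hpa
      by_cases hp : some 'a' = prev
      · by_cases h3 : run + 1 = 3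
        · simp [vhsLoop, noTripO, hp, h3]
        · have hN : noTripO prev run ('a' :: rest) = noTripO prev (run + 1) rest := by
            simp [noTripO, hp, h3]
          have hD : decide (na + (('a' :: rest).count 'a' : Int) ≤ a
                ∧ nb + (('a' :: rest).count 'b' : Int) ≤ b
                ∧ nc + (('a' :: rest).count 'c' : Int) ≤ c)
              = decide (na + 1 + (rest.count 'a' : Int) ≤ a
                ∧ nb + (rest.count 'b' : Int) ≤ b ∧ nc + (rest.count 'c' : Int) ≤ c) := by
            apply decide_eq_decide.mpr
            rw [hcA 'a', hcA 'b', hcA 'c']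
            simp
            omega
          rw [hall2, hN, hD]
          rw [show okChar 'a' = true from rfl, Bool.true_and]
          rw [show vhsLoop ('a' :: rest) na nb nc prev run a b c
                = vhsLoop rest (na + 1) nb nc prev (run + 1) a b c from by
            simp [vhsLoop, hp, h3]]
          exact ih (na + 1) nb nc prev (run + 1) a b c
      · have hN : noTripO prev run ('a' :: rest) = noTripO (some 'a') 1 rest := by
          simp [noTripO, hp]
        have hD : decide (na + (('a' :: rest).count 'a' : Int) ≤ a
              ∧ nb + (('a' :: rest).count 'b' : Int) ≤ b
              ∧ nc + (('a' :: rest).count 'c' : Int) ≤ c)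
            = decide (na + 1 + (rest.count 'a' : Int) ≤ a
              ∧ nb + (rest.count 'b' : Int) ≤ b ∧ nc + (rest.count 'c' : Int) ≤ c) := by
          apply decide_eq_decide.mpr
          rw [hcA 'a', hcA 'b', hcA 'c']
          simp
          omega
        rw [hall2, hN, hD]
        rw [show okChar 'a' = true from rfl, Bool.true_and]
        rw [show vhsLoop ('a' :: rest) na nb nc prev run a b c
              = vhsLoop rest (na + 1) nb nc (some 'a') 1 a b c from by
          simp [vhsLoop, hp]]
        exact ih (na + 1) nb nc (some 'a') 1 a b c
    · by_cases hpb : ch = 'b'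
      · subst hpb
        by_cases hp : some 'b' = prev
        · by_cases h3 : run + 1 = 3
          · simp [vhsLoop, noTripO, hp, h3]
          · have hN : noTripO prev run ('b' :: rest) = noTripO prev (run + 1) rest := by
              simp [noTripO, hp, h3]
            have hD : decide (na + (('b' :: rest).count 'a' : Int) ≤ a
                  ∧ nb + (('b' :: rest).count 'b' : Int) ≤ b
                  ∧ nc + (('b' :: rest).count 'c' : Int) ≤ c)
                = decide (na + (rest.count 'a' : Int) ≤ a
                  ∧ nb + 1 + (rest.count 'b' : Int) ≤ b ∧ nc + (rest.count 'c' : Int) ≤ c) := by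
              apply decide_eq_decide.mpr
              rw [hcA 'a', hcA 'b', hcA 'c']
              simp
              omega
            rw [hall2, hN, hD]
            rw [show okChar 'b' = true from rfl, Bool.true_and]
            rw [show vhsLoop ('b' :: rest) na nb nc prev run a b c
                  = vhsLoop rest na (nb + 1) nc prev (run + 1) a b c from by
              simp [vhsLoop, hp, h3]]
            exact ih na (nb + 1) nc prev (run + 1) a b c
        · have hN : noTripO prev run ('b' :: rest) = noTripO (some 'b') 1 rest := by
            simp [noTripO, hp]
          have hD : decide (na + (('b' :: rest).count 'a' : Int) ≤ a
                ∧ nb + (('b' :: rest).count 'b' : Int) ≤ b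
                ∧ nc + (('b' :: rest).count 'c' : Int) ≤ c)
              = decide (na + (rest.count 'a' : Int) ≤ a
                ∧ nb + 1 + (rest.count 'b' : Int) ≤ b ∧ nc + (rest.count 'c' : Int) ≤ c) := by
            apply decide_eq_decide.mpr
            rw [hcA 'a', hcA 'b', hcA 'c']
            simp
            omega
          rw [hall2, hN, hD]
          rw [show okChar 'b' = true from rfl, Bool.true_and]
          rw [show vhsLoop ('b' :: rest) na nb nc prev run a b c
                = vhsLoop rest na (nb + 1) nc (some 'b') 1 a b c from by
            simp [vhsLoop, hp]]
          exact ih na (nb + 1) nc (some 'b') 1 a b c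
      · by_cases hpc : ch = 'c'
        · subst hpc
          by_cases hp : some 'c' = prev
          · by_cases h3 : run + 1 = 3
            · simp [vhsLoop, noTripO, hp, h3]
            · have hN : noTripO prev run ('c' :: rest) = noTripO prev (run + 1) rest := by
                simp [noTripO, hp, h3]
              have hD : decide (na + (('c' :: rest).count 'a' : Int) ≤ a
                    ∧ nb + (('c' :: rest).count 'b' : Int) ≤ b
                    ∧ nc + (('c' :: rest).count 'c' : Int) ≤ c)
                  = decide (na + (rest.count 'a' : Int) ≤ a
                    ∧ nb + (rest.count 'b' : Int) ≤ b ∧ nc + 1 + (rest.count 'c' : Int) ≤ c) := by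
                apply decide_eq_decide.mpr
                rw [hcA 'a', hcA 'b', hcA 'c']
                simp
                omega
              rw [hall2, hN, hD]
              rw [show okChar 'c' = true from rfl, Bool.true_and]
              rw [show vhsLoop ('c' :: rest) na nb nc prev run a b c
                    = vhsLoop rest na nb (nc + 1) prev (run + 1) a b c from by
                simp [vhsLoop, hp, h3]]
              exact ih na nb (nc + 1) prev (run + 1) a b c
          · have hN : noTripO prev run ('c' :: rest) = noTripO (some 'c') 1 rest := by
              simp [noTripO, hp]
            have hD : decide (na + (('c' :: rest).count 'a' : Int) ≤ a
                  ∧ nb + (('c' :: rest).count 'b' : Int) ≤ b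
                  ∧ nc + (('c' :: rest).count 'c' : Int) ≤ c)
                = decide (na + (rest.count 'a' : Int) ≤ a
                  ∧ nb + (rest.count 'b' : Int) ≤ b ∧ nc + 1 + (rest.count 'c' : Int) ≤ c) := by
              apply decide_eq_decide.mpr
              rw [hcA 'a', hcA 'b', hcA 'c']
              simp
              omega
            rw [hall2, hN, hD]
            rw [show okChar 'c' = true from rfl, Bool.true_and]
            rw [show vhsLoop ('c' :: rest) na nb nc prev run a b c
                  = vhsLoop rest na nb (nc + 1) (some 'c') 1 a b c from by
              simp [vhsLoop, hp]]
            exact ih na nb (nc + 1) (some 'c') 1 a b c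
        · simp [vhsLoop, hpa, hpb, hpc, okChar]

lemma count_go_singleton (v : Char) (l : List Char) : ∀ (fuel acc : Nat), l.length ≤ fuel →
    PySem.Chars.count.go [v] fuel l acc = acc + l.count v := by
  induction l with
  | nil =>
    intro fuel acc _
    cases fuel <;> simp [PySem.Chars.count.go]
  | cons hd t ih =>
    intro fuel acc h
    cases fuel with
    | zero => simp at h
    | succ f =>
      by_cases hv : v = hd
      · subst hv
        simp only [PySem.Chars.count.go, List.isPrefixOf, beq_self_eq_true, Bool.true_and]
        rw [if_pos (by simp)]
        rw [show List.drop (List.length [v]) (v :: t) = t from rfl]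
        rw [ih f (acc + 1) (by simpa using h)]
        simp
        omega
      · have hpre : [v].isPrefixOf (hd :: t) = false := by
          simp [List.isPrefixOf]
          exact fun hh => absurd hh hv
        simp only [PySem.Chars.count.go, hpre, Bool.false_eq_true, if_false]
        rw [ih f acc (by simpa using h)]
        simp [Ne.symm hv]

lemma chars_count_singleton (l : List Char) (v : Char) :
    PySem.Chars.count l [v] = l.count v := by
  simp only [PySem.Chars.count, List.isEmpty_cons, Bool.false_eq_true, if_false]
  exact (count_go_singleton v l l.length 0 le_rfl).trans (by simp)

lemma two_prefix {p : Char} {rest : List Char} (h : [p, p] <+: rest) : [p] <+: rest :=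
  List.IsPrefix.trans ⟨[p], rfl⟩ h

lemma trip_cons (ch : Char) (rest : List Char) :
    (∃ x, [x, x, x] <:+: ch :: rest) ↔ (∃ x, [x, x, x] <:+: rest) ∨ [ch, ch] <+: rest := by
  constructor
  · rintro ⟨x, h⟩
    rcases List.infix_cons_iff.mp h with hp | hi
    · obtain ⟨rfl, hp'⟩ := List.cons_prefix_cons.mp hp
      exact Or.inr hp'
    · exact Or.inl ⟨x, hi⟩
  · rintro (⟨x, hi⟩ | hp)
    · exact ⟨x, List.infix_cons_iff.mpr (Or.inr hi)⟩
    · exact ⟨ch, List.infix_cons_iff.mpr (Or.inl (List.cons_prefix_cons.mpr ⟨rfl, hp⟩))⟩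

lemma nt_some (l : List Char) : ∀ (p : Char) (r : Nat), r = 1 ∨ r = 2 →
    (noTripO (some p) r l = false ↔ (∃ x, [x, x, x] <:+: l) ∨ List.replicate (3 - r) p <+: l) := by
  induction l with
  | nil =>
    intro p r hr
    constructor
    · intro h; simp [noTripO] at h
    · rintro (⟨x, hx⟩ | hp)
      · simp at hx
      · exfalso
        have := List.IsPrefix.length_le hp
        simp [List.length_replicate] at this
        omega
  | cons ch rest ih =>
    intro p r hr
    by_cases hcp : ch = p
    · subst hcp
      rcases hr with rfl | rfl
      · -- r = 1 : recurse with run 2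
        rw [show noTripO (some ch) 1 (ch :: rest) = noTripO (some ch) 2 rest from by
          simp [noTripO]]
        rw [ih ch 2 (Or.inr rfl)]
        rw [trip_cons]
        rw [show List.replicate (3 - 2) ch = [ch] from rfl,
            show List.replicate (3 - 1) ch = [ch, ch] from rfl]
        have h3 : ([ch, ch] <+: ch :: rest) ↔ [ch] <+: rest := by
          rw [List.cons_prefix_cons]; simp
        rw [h3]
        constructor
        · rintro (ht | hp)
          · exact Or.inl (Or.inl ht)
          · exact Or.inr hp
        · rintro ((ht | hp) | hp)
          · exact Or.inl ht
          · exact Or.inr (two_prefix hp)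
          · exact Or.inr hp
      · -- r = 2 : triple found
        rw [show noTripO (some ch) 2 (ch :: rest) = false from by simp [noTripO]]
        constructor
        · intro _
          exact Or.inr (by
            rw [show List.replicate (3 - 2) ch = [ch] from rfl]
            exact List.cons_prefix_cons.mpr ⟨rfl, List.nil_prefix⟩)
        · intro _; rfl
    · have hne : ¬ (some ch = some p) := by simpa using fun h => hcp h
      rw [show noTripO (some p) r (ch :: rest) = noTripO (some ch) 1 rest from by
        simp [noTripO, hne]]
      rw [ih ch 1 (Or.inl rfl)]
      rw [trip_cons]
      have hrep : ¬ (List.replicate (3 - r) p <+: ch :: rest) := by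
        intro hp
        rcases hr with rfl | rfl
        · exact hcp (List.cons_prefix_cons.mp hp).1.symm
        · exact hcp (List.cons_prefix_cons.mp hp).1.symm
      rw [show List.replicate (3 - 1) ch = [ch, ch] from rfl]
      constructor
      · rintro (ht | hp)
        · exact Or.inl (Or.inl ht)
        · exact Or.inl (Or.inr hp)
      · rintro ((ht | hp) | hp)
        · exact Or.inl ht
        · exact Or.inr hp
        · exact absurd hp hrep

lemma nt_none (l : List Char) : noTripO none 0 l = false ↔ ∃ x, [x, x, x] <:+: l := by
  cases l with
  | nil => simp [noTripO]
  | cons ch rest =>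
    rw [show noTripO none 0 (ch :: rest) = noTripO (some ch) 1 rest from by simp [noTripO]]
    rw [nt_some rest ch 1 (Or.inl rfl)]
    rw [trip_cons]
    rw [show List.replicate (3 - 1) ch = [ch, ch] from rfl]

lemma trips_of_all (l : List Char) (h : l.all okChar = true) :
    (∃ x, [x, x, x] <:+: l) ↔
      (['a','a','a'] <:+: l ∨ ['b','b','b'] <:+: l ∨ ['c','c','c'] <:+: l) := by
  constructor
  · rintro ⟨x, hx⟩
    have hmem : x ∈ l := hx.sublist.subset (by simp)
    have hok := List.all_eq_true.mp h x hmem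
    simp only [okChar, Bool.or_eq_true, beq_iff_eq] at hok
    rcases hok with (rfl | rfl) | rfl
    · exact Or.inl hx
    · exact Or.inr (Or.inl hx)
    · exact Or.inr (Or.inr hx)
  · rintro (hx | hx | hx)
    · exact ⟨'a', hx⟩
    · exact ⟨'b', hx⟩
    · exact ⟨'c', hx⟩

lemma isIn_abc (ch : Char) : PySem.Chars.isIn [ch] "abc".toList = okChar ch := by
  rw [show "abc".toList = ['a', 'b', 'c'] from rfl]
  cases hok : okChar ch with
  | true =>
    rw [PySem.Chars.isIn_iff_infix]
    simp only [okChar, Bool.or_eq_true, beq_iff_eq] at hok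
    rw [List.singleton_infix_iff]
    rcases hok with (rfl | rfl) | rfl <;> simp
  | false =>
    rw [PySem.Chars.isIn_eq_false_iff]
    intro hinf
    have hmem : ch ∈ ['a', 'b', 'c'] := (List.singleton_infix_iff ch _).mp hinf
    have hok' : okChar ch = true := by fin_cases hmem <;> rfl
    rw [hok] at hok'
    exact Bool.false_ne_true hok'

-- ===== VERDICT =====
theorem validate_happy_string_spec : Claim_unchanged_validate_happy_string := by
  intro result a b c _ hnd
  show validate_happy_string result a b c = validate_happy_string_alt result a b c
  by_cases hres : result = ""
  · subst hres
    have hd : ¬(a < 0 ∨ b < 0 ∨ c < 0) := fun h => hnd ⟨rfl, h⟩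
    have h1 : 0 ≤ a := not_lt.mp fun h => hd (Or.inl h)
    have h2 : 0 ≤ b := not_lt.mp fun h => hd (Or.inr (Or.inl h))
    have h3 : 0 ≤ c := not_lt.mp fun h => hd (Or.inr (Or.inr h))
    have hnil : ("" : String).toList = [] := rfl
    simp [validate_happy_string, validate_happy_string_alt, vhsLoop, hnil, h1, h2, h3]
  · have hcnt : ∀ v : Char, (PySem.Str.count result (String.ofList [v]) : Nat) = result.toList.count v := by
      intro v
      simp [PySem.Str.count, chars_count_singleton]
    have ca : PySem.Str.count result "a" = result.toList.count 'a' := hcnt 'a'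
    have cb : PySem.Str.count result "b" = result.toList.count 'b' := hcnt 'b'
    have cc : PySem.Str.count result "c" = result.toList.count 'c' := hcnt 'c'
    rw [show validate_happy_string_alt result a b c
          = vhsLoop result.toList 0 0 0 none 0 a b c from rfl, vhsLoop_eq]
    by_cases hall : result.toList.all okChar = true
    · by_cases htrip : ∃ x, [x, x, x] <:+: result.toList
      · have hb : noTripO none 0 result.toList = false := (nt_none _).mpr htrip
        have htr := (trips_of_all _ hall).mp htrip
        have hA : (PySem.Str.isIn "aaa" result || PySem.Str.isIn "bbb" result
            || PySem.Str.isIn "ccc" result) = true := by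
          rcases htr with h | h | h
          · rw [(PySem.Str.isIn_iff_infix "aaa" result).mpr h]
            rw [Bool.true_or, Bool.true_or]
          · rw [(PySem.Str.isIn_iff_infix "bbb" result).mpr h]
            rw [Bool.or_true, Bool.true_or]
          · rw [(PySem.Str.isIn_iff_infix "ccc" result).mpr h]
            rw [Bool.or_true]
        have hterm : validate_happy_string result a b c = false := by
          unfold validate_happy_string
          rw [if_neg hres, hA]
          simp
        rw [hterm, hb]
        simp
      · have hb : noTripO none 0 result.toList = true := by
          cases h : noTripO none 0 result.toList with
          | true => rfl
          | false => exact absurd ((nt_none _).mp h) htrip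
        have e1 : PySem.Str.isIn "aaa" result = false := by
          rw [Bool.eq_false_iff]
          intro h
          exact htrip ⟨'a', (PySem.Str.isIn_iff_infix _ _).mp h⟩
        have e2 : PySem.Str.isIn "bbb" result = false := by
          rw [Bool.eq_false_iff]
          intro h
          exact htrip ⟨'b', (PySem.Str.isIn_iff_infix _ _).mp h⟩
        have e3 : PySem.Str.isIn "ccc" result = false := by
          rw [Bool.eq_false_iff]
          intro h
          exact htrip ⟨'c', (PySem.Str.isIn_iff_infix _ _).mp h⟩
        simp only [validate_happy_string, if_neg hres, e1, e2, e3, ca, cb, cc, isIn_abc, hall,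
          hb, Bool.or_false, Bool.and_true, Bool.true_and, Bool.not_true,
          Bool.false_eq_true, if_false]
        split_ifs with hgt
        · rw [eq_comm, decide_eq_false_iff_not]
          intro hle
          obtain ⟨g1, g2, g3⟩ := hle
          simp only [gt_iff_lt, Bool.or_eq_true, decide_eq_true_eq] at hgt
          omega
        · rw [eq_comm, decide_eq_true_eq]
          simp only [gt_iff_lt, Bool.or_eq_true, decide_eq_true_eq, not_or, not_lt] at hgt
          refine ⟨by omega, by omega, by omega⟩
    · have hall' : result.toList.all okChar = false := by
        cases h : result.toList.all okChar with
        | true => exact absurd h hall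
        | false => rfl
      have hA : (result.toList.all fun ch => PySem.Chars.isIn [ch] "abc".toList) = false := by
        rw [show (fun ch => PySem.Chars.isIn [ch] "abc".toList) = okChar from funext isIn_abc]
        exact hall'
      simp only [hall', Bool.false_and]
      simp only [validate_happy_string, if_neg hres, hA]
      split_ifs <;> simp_all

theorem validate_happy_string_changed : Claim_changed_validate_happy_string := by
  unfold Claim_changed_validate_happy_string; decide

theorem validate_happy_string_tight : Claim_exact_validate_happy_string := by
  intro result a b c _ hD
  obtain ⟨rfl, hneg⟩ := hD
  have hA : validate_happy_string "" a b c = true := by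
    simp [validate_happy_string]
  have hB : validate_happy_string_alt "" a b c = false := by
    rw [show validate_happy_string_alt "" a b c
          = (decide (0 ≤ a) && decide (0 ≤ b) && decide (0 ≤ c)) from rfl]
    rcases hneg with h | h | h <;> simp <;> omega
  rw [hA, hB]
  simp
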